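-- pv_equiv track=rewrite | github.com/arcorck/DUT-AS | sdd/TP4.py | hippies
-- ===== SOURCE A (Python) =====
-- def reciproque(dicoAmoureux):
--     """
--     renvoie les couples dont l'amour est reciproque
--     """
--     res = set()
--     for membre_atm, amoureux in dicoAmoureux.items() :
--         for amoureu in amoureux :
--             if amoureu in dicoAmoureux.keys() :
--                 if membre_atm in dicoAmoureux[amoureu] and (membre_atm,amoureu) not in res and (amoureu, membre_atm) not in res and membre_atm != amoureu:
--                     res.add((membre_atm, amoureu))
--     return res
--
-- def hippies (dicoAmoureux, ensemble_des_amoureux) :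
--     res = True
--     est_aime = 0
--     les_couples = reciproque(dicoAmoureux)
--     for amoureu in ensemble_des_amoureux :
--         for amoureux1, amoureux2 in les_couples :
--             if amoureux1 == amoureu or amoureux2 == amoureu :
--                 est_aime += 1
--         if est_aime == 0 :
--             res = False
--         else :
--             est_aime = 0
--     return res
-- ===== SOURCE B (Python) =====
-- def hippies(dicoAmoureux, ensemble_des_amoureux):
--     def en_couple(p):
--         if p not in dicoAmoureux:
--             return False
--         return any(q != p and q in dicoAmoureux and p in dicoAmoureux[q]
--                    for q in dicoAmoureux[p])
--     return all(en_couple(p) for p in ensemble_des_amoureux)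
-- ===== Notes on version B (the rewrite author's own statement) =====
-- stated objective: simpler
-- what changed: Drops the intermediate set of reciprocal couples and the per-person scan over it; instead checks each person directly for a reciprocal partner via dictionary lookups, short-circuiting with any/all.
import Mathlib
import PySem

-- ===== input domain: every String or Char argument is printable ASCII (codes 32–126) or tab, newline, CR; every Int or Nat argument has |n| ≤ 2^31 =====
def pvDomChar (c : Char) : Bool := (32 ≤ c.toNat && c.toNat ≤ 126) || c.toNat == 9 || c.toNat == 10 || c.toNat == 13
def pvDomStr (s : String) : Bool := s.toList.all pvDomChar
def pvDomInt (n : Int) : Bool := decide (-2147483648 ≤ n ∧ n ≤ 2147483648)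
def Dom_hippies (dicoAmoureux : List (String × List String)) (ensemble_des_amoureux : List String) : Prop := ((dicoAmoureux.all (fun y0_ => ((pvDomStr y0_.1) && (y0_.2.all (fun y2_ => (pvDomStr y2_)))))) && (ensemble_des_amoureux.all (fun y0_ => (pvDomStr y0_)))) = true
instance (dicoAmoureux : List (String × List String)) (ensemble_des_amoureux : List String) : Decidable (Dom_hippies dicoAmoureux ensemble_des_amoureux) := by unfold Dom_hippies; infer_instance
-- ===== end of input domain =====

-- B drops the intermediate set of reciprocal couples and checks each person's reciprocity
-- directly via dictionary lookups (objective: simpler).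


-- ===== PORT A =====
-- inner loop body of reciproque: one candidate 'amoureu' for the key 'membre'
def recipStep (d : PySem.Dict String (List String)) (membre : String)
    (res : PySem.Set (String × String)) (amoureu : String) : PySem.Set (String × String) :=
  if d.contains amoureu then
    if (d.getD amoureu []).contains membre && !(PySem.Set.contains res (membre, amoureu))
        && !(PySem.Set.contains res (amoureu, membre)) && membre != amoureu then
      PySem.Set.add res (membre, amoureu)
    else res
  else res

def reciproquePort (d : PySem.Dict String (List String)) : PySem.Set (String × String) :=
  d.items.foldl (fun res p => p.2.foldl (recipStep d p.1) res) PySem.Set.empty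

-- loop body of hippies: one person 'amoureu', state (res, est_aime)
def hipStep (les_couples : PySem.Set (String × String)) (st : Bool × Int) (amoureu : String) : Bool × Int :=
  let est_aime := les_couples.foldl
    (fun c q => if q.1 == amoureu || q.2 == amoureu then c + 1 else c) st.2
  if est_aime == 0 then (false, est_aime) else (st.1, 0)

def hippies (dicoAmoureux : List (String × List String)) (ensemble_des_amoureux : List String) : Bool :=
  let d := PySem.Dict.ofList dicoAmoureux
  let les_couples := reciproquePort d
  (ensemble_des_amoureux.foldl (hipStep les_couples) (true, (0 : Int))).1

-- ===== PORT B =====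
def enCouple (d : PySem.Dict String (List String)) (p : String) : Bool :=
  match d.get? p with
  | none => false
  | some lst => lst.any (fun q => q != p && d.contains q && (d.getD q []).contains p)

def hippies_alt (dicoAmoureux : List (String × List String)) (ensemble_des_amoureux : List String) : Bool :=
  let d := PySem.Dict.ofList dicoAmoureux
  ensemble_des_amoureux.all (enCouple d)

-- ===== PRECONDITION & SPEC =====
def Spec_hippies (dicoAmoureux : List (String × List String)) (ensemble_des_amoureux : List String) (out : Bool) : Prop := out = hippies_alt dicoAmoureux ensemble_des_amoureux
instance (dicoAmoureux : List (String × List String)) (ensemble_des_amoureux : List String) (out : Bool) : Decidable (Spec_hippies dicoAmoureux ensemble_des_amoureux out) := by unfold Spec_hippies; infer_instance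

-- ===== CLAIM (what is proved, stated in full; the proofs are below) =====
def Claim_equal_hippies : Prop := ∀ (dicoAmoureux : List (String × List String)) (ensemble_des_amoureux : List String), Dom_hippies dicoAmoureux ensemble_des_amoureux → Spec_hippies dicoAmoureux ensemble_des_amoureux (hippies dicoAmoureux ensemble_des_amoureux)

-- ===== LEMMAS AND PROOFS =====

-- (a, b) is a reciprocal couple of d
def Good (d : PySem.Dict String (List String)) (a b : String) : Prop :=
  d.contains a = true ∧ d.contains b = true ∧ a ≠ b ∧
  a ∈ d.getD b [] ∧ b ∈ d.getD a []

theorem good_symm {d : PySem.Dict String (List String)} {a b : String}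
    (h : Good d a b) : Good d b a := ⟨h.2.1, h.1, h.2.2.1.symm, h.2.2.2.2, h.2.2.2.1⟩

-- membership is monotone along the inner fold
theorem mem_recipStep {d : PySem.Dict String (List String)} {m : String}
    {res : PySem.Set (String × String)} {x : String × String} (a : String)
    (h : x ∈ res) : x ∈ recipStep d m res a := by
  unfold recipStep
  split_ifs <;> simp [PySem.Set.mem_add, h]

theorem mem_innerFold {d : PySem.Dict String (List String)} {m : String}
    (lst : List String) {res : PySem.Set (String × String)} {x : String × String}
    (h : x ∈ res) : x ∈ lst.foldl (recipStep d m) res := by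
  induction lst generalizing res with
  | nil => exact h
  | cons a t ih => exact ih (mem_recipStep a h)

theorem mem_outerFold {d : PySem.Dict String (List String)}
    (items : List (String × List String)) {res : PySem.Set (String × String)}
    {x : String × String} (h : x ∈ res) :
    x ∈ items.foldl (fun res p => p.2.foldl (recipStep d p.1) res) res := by
  induction items generalizing res with
  | nil => exact h
  | cons p t ih => exact ih (mem_innerFold p.2 h)

-- soundness of the inner fold: it only ever adds Good pairs
theorem inner_sound {d : PySem.Dict String (List String)} {m : String}
    (lst : List String) {res : PySem.Set (String × String)}
    (hm : d.contains m = true) (hl : ∀ a ∈ lst, a ∈ d.getD m [])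
    (hres : ∀ x ∈ res, Good d x.1 x.2) :
    ∀ x ∈ lst.foldl (recipStep d m) res, Good d x.1 x.2 := by
  induction lst generalizing res with
  | nil => exact hres
  | cons a t ih =>
    refine ih (fun b hb => hl b (List.mem_cons_of_mem _ hb)) ?_
    intro x hx
    unfold recipStep at hx
    split_ifs at hx with h1 h2
    · rcases (PySem.Set.mem_add _ _ _).1 hx with h | h
      · exact hres x h
      · subst h
        simp only [Bool.and_eq_true, bne_iff_ne, List.contains_eq_mem, decide_eq_true_eq] at h2
        exact ⟨hm, h1, h2.2, h2.1.1.1, hl a (List.mem_cons_self)⟩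
    · exact hres x hx
    · exact hres x hx

-- soundness of reciproque: every element of the couples set is a Good pair
theorem recip_sound {d : PySem.Dict String (List String)} (hnd : d.keys.Nodup) :
    ∀ x ∈ reciproquePort d, Good d x.1 x.2 := by
  unfold reciproquePort
  have key : ∀ (items : List (String × List String)) (res : PySem.Set (String × String)),
      (∀ p ∈ items, p ∈ d.items) → (∀ x ∈ res, Good d x.1 x.2) →
      ∀ x ∈ items.foldl (fun res p => p.2.foldl (recipStep d p.1) res) res, Good d x.1 x.2 := by
    intro items
    induction items with
    | nil => intro res _ hres; exact hres
    | cons p t ih =>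
      intro res hit hres
      refine ih _ (fun q hq => hit q (List.mem_cons_of_mem _ hq)) ?_
      obtain ⟨k, v⟩ := p
      have hp : (k, v) ∈ d.items := hit (k, v) List.mem_cons_self
      have hget : d.get? k = some v := PySem.Dict.get?_of_mem_items d hp hnd
      have hcont : d.contains k = true := by
        rw [PySem.Dict.contains_eq_isSome_get?, hget]; rfl
      have hgetD : d.getD k [] = v := PySem.Dict.getD_of_get?_eq_some d [] hget
      exact inner_sound v hcont (fun a ha => hgetD ▸ ha) hres
  exact key d.items PySem.Set.empty (fun p hp => hp) (by intro x hx; simp [PySem.Set.empty] at hx)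

-- completeness of the inner fold: a Good pair keyed at m with partner in lst ends up in res (in one orientation)
theorem inner_complete {d : PySem.Dict String (List String)} {m b : String}
    (lst : List String) (res : PySem.Set (String × String))
    (hg : Good d m b) (hb : b ∈ lst) :
    (m, b) ∈ lst.foldl (recipStep d m) res ∨ (b, m) ∈ lst.foldl (recipStep d m) res := by
  induction lst generalizing res with
  | nil => cases hb
  | cons a t ih =>
    rcases List.mem_cons.1 hb with heq | hb'
    · -- head is the partner
      subst heq
      by_cases hin : (m, b) ∈ res ∨ (b, m) ∈ res
      · rcases hin with h | h
        · exact Or.inl (mem_innerFold t (mem_recipStep b h))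
        · exact Or.inr (mem_innerFold t (mem_recipStep b h))
      · rw [not_or] at hin
        have hstep : recipStep d m res b = PySem.Set.add res (m, b) := by
          unfold recipStep
          rw [if_pos hg.2.1, if_pos]
          simp only [Bool.and_eq_true, List.contains_eq_mem, decide_eq_true_eq,
            Bool.not_eq_true', bne_iff_ne]
          refine ⟨⟨⟨hg.2.2.2.1, ?_⟩, ?_⟩, hg.2.2.1⟩
          · simp [PySem.Set.contains_eq_listContains, List.contains_eq_mem, hin.1]
          · simp [PySem.Set.contains_eq_listContains, List.contains_eq_mem, hin.2]
        rw [List.foldl_cons, hstep]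
        exact Or.inl (mem_innerFold t (by simp [PySem.Set.mem_add]))
    · exact ih _ hb'
-- completeness of reciproque
theorem recip_complete {d : PySem.Dict String (List String)}
    {a b : String} (hg : Good d a b) :
    (a, b) ∈ reciproquePort d ∨ (b, a) ∈ reciproquePort d := by
  have hca := hg.1
  have hsome : ∃ v, d.get? a = some v := by
    rw [PySem.Dict.contains_eq_isSome_get?] at hca
    exact Option.isSome_iff_exists.1 hca
  rcases hsome with ⟨v, hv⟩
  have hitem : (a, v) ∈ d.items := PySem.Dict.mem_items_of_get?_eq_some d hv
  have hgetD : d.getD a [] = v := PySem.Dict.getD_of_get?_eq_some d [] hv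
  have hbv : b ∈ v := hgetD ▸ hg.2.2.2.2
  rcases List.append_of_mem hitem with ⟨l1, l2, hsplit⟩
  unfold reciproquePort
  rw [hsplit, List.foldl_append, List.foldl_cons]
  set res0 := l1.foldl (fun res p => p.2.foldl (recipStep d p.1) res) PySem.Set.empty
  rcases inner_complete (m := a) (b := b) v res0 hg hbv with h | h
  · exact Or.inl (mem_outerFold l2 h)
  · exact Or.inr (mem_outerFold l2 h)

-- B's per-person test holds exactly when the person has a reciprocal partner
theorem enCouple_iff_good (d : PySem.Dict String (List String)) (p : String) :
    enCouple d p = true ↔ ∃ q, Good d p q := by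
  unfold enCouple
  cases hget : d.get? p with
  | none =>
    simp only [Bool.false_eq_true, false_iff]
    rintro ⟨q, hg⟩
    have := hg.1
    rw [PySem.Dict.contains_eq_isSome_get?, hget] at this
    exact absurd this (by simp)
  | some lst =>
    have hcont : d.contains p = true := by
      rw [PySem.Dict.contains_eq_isSome_get?, hget]; rfl
    have hgetD : d.getD p [] = lst := PySem.Dict.getD_of_get?_eq_some d [] hget
    simp only [List.any_eq_true, Bool.and_eq_true, bne_iff_ne, List.contains_eq_mem,
      decide_eq_true_eq]
    constructor
    · rintro ⟨q, hq, ⟨hne, hcq⟩, hpq⟩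
      exact ⟨q, hcont, hcq, fun h => hne h.symm, hpq, hgetD ▸ hq⟩
    · rintro ⟨q, hg⟩
      exact ⟨q, hgetD ▸ hg.2.2.2.2, ⟨fun h => hg.2.2.1 h.symm, hg.2.1⟩, hg.2.2.2.1⟩

-- the inner counting fold of A is a countP
theorem count_fold (couples : List (String × String)) (p : String) (c0 : Int) :
    couples.foldl (fun c q => if q.1 == p || q.2 == p then c + 1 else c) c0
      = c0 + (couples.countP (fun q => q.1 == p || q.2 == p) : Int) := by
  induction couples generalizing c0 with
  | nil => simp
  | cons q t ih =>
    simp only [List.foldl_cons, List.countP_cons]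
    split_ifs with h
    · rw [ih]; push_cast; ring
    · rw [ih]; simp

-- one hipStep from a clean counter: False if untouched, else keep the flag
theorem hipStep_eq (couples : PySem.Set (String × String)) (b : Bool) (p : String) :
    hipStep couples (b, 0) p
      = if couples.any (fun q => q.1 == p || q.2 == p) then (b, 0) else (false, 0) := by
  unfold hipStep
  simp only
  rw [count_fold]
  by_cases h : couples.countP (fun q => q.1 == p || q.2 == p) = 0
  · have hany : couples.any (fun q => q.1 == p || q.2 == p) = false := by
      rw [List.any_eq_false]
      intro q hq
      simpa using List.countP_eq_zero.1 h q hq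
    rw [if_pos (by simp [h]), if_neg (by simp [hany])]
    simp [h]
  · have hany : couples.any (fun q => q.1 == p || q.2 == p) = true := by
      rw [List.any_eq_true]
      rcases List.countP_pos_iff.1 (Nat.pos_of_ne_zero h) with ⟨q, hq, hqp⟩
      exact ⟨q, hq, hqp⟩
    rw [if_neg (by simp [h]), if_pos hany]

-- A's main fold computes "acc && everyone touched"
theorem main_fold (couples : PySem.Set (String × String)) (ens : List String) (b : Bool) :
    (ens.foldl (hipStep couples) (b, (0 : Int))).1
      = (b && ens.all (fun p => couples.any (fun q => q.1 == p || q.2 == p))) := by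
  induction ens generalizing b with
  | nil => simp
  | cons p t ih =>
    rw [List.foldl_cons, hipStep_eq, List.all_cons]
    cases h : couples.any (fun q => q.1 == p || q.2 == p)
    · rw [if_neg (by simp), ih]; simp
    · rw [if_pos rfl, ih]; simp

-- the "touched by some couple" test equals B's per-person test
theorem touched_eq_enCouple (d : PySem.Dict String (List String)) (hnd : d.keys.Nodup)
    (p : String) :
    (reciproquePort d).any (fun q => q.1 == p || q.2 == p) = enCouple d p := by
  rcases h : enCouple d p with _ | _
  · rw [← Bool.not_eq_true, List.any_eq_true]
    rintro ⟨q, hq, hqp⟩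
    have hg := recip_sound hnd q hq
    simp only [Bool.or_eq_true, beq_iff_eq] at hqp
    have : ∃ r, Good d p r := by
      rcases hqp with rfl | rfl
      · exact ⟨q.2, hg⟩
      · exact ⟨q.1, good_symm hg⟩
    rw [← enCouple_iff_good] at this
    rw [h] at this
    exact absurd this (by simp)
  · rcases (enCouple_iff_good d p).1 h with ⟨q, hg⟩
    rw [List.any_eq_true]
    rcases recip_complete hg with hm | hm
    · exact ⟨(p, q), hm, by simp⟩
    · exact ⟨(q, p), hm, by simp⟩

-- ===== VERDICT (by name: the statement is the Claim_ definition above) =====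
theorem hippies_spec : Claim_equal_hippies := by
  intro dico ens _
  unfold Spec_hippies hippies hippies_alt
  simp only
  rw [main_fold, Bool.true_and]
  exact congrArg ens.all (funext fun p =>
    touched_eq_enCouple _ (PySem.Dict.nodup_keys_ofList dico) p)
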